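-- pv_equiv track=rewrite | github.com/asergio-marques/f1_league_racing_bot | src/services/season_points_service.py | _collapse_trailing_zeros
-- ===== SOURCE A (Python) =====
-- def _collapse_trailing_zeros(rows: list[tuple[int, int]]) -> list[tuple[str, int]]:
--     """
--     Given [(pos, pts), ...] in ascending position order, collapse trailing zeros.
--
--     Returns labelled tuples: [("1", 25), ("2", 18), ("3+", 0)] etc.
--     """
--     if not rows:
--         return []
--
--     # Find the last position with points > 0
--     last_nonzero = -1
--     for i, (_, pts) in enumerate(rows):
--         if pts > 0:
--             last_nonzero = i
--
--     if last_nonzero == -1: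
--         # All zeros — collapse everything
--         first_pos = rows[0][0]
--         return [(f"{first_pos}+", 0)]
--
--     result: list[tuple[str, int]] = []
--     for i, (pos, pts) in enumerate(rows):
--         if i <= last_nonzero:
--             result.append((str(pos), pts))
--         else:
--             # First trailing zero — emit sentinel and stop
--             result.append((f"{pos}+", 0))
--             break
--
--     return result
-- ===== SOURCE B (Python) =====
-- def _collapse_trailing_zeros(rows: list[tuple[int, int]]) -> list[tuple[str, int]]:
--     # Single forward pass with a buffer of not-yet-classified zero rows: a positive
--     # row flushes the buffer as ordinary rows; whatever is still buffered at the end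
--     # is the trailing-zero run and collapses into one sentinel.
--     result = []
--     pending = []  # zero-or-less rows not yet known to be trailing
--     for pos, pts in rows:
--         if pts > 0:
--             result.extend((str(p), q) for p, q in pending)
--             pending = []
--             result.append((str(pos), pts))
--         else:
--             pending.append((pos, pts))
--     if pending:
--         result.append((f"{pending[0][0]}+", 0))
--     return result
-- ===== Notes on version B (the rewrite author's own statement) =====
-- stated objective: alternative
-- what changed: A first scans the whole list to compute the last-nonzero index and then rebuilds the output in a second indexed loop with separate empty/all-zeros branches; B is a single forward pass with no indices at all: it buffers runs of non-positive rows, flushes the buffer when a positive row proves the run was interior, and collapses whatever remains buffered at the end into the one sentinel row.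
import Mathlib
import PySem

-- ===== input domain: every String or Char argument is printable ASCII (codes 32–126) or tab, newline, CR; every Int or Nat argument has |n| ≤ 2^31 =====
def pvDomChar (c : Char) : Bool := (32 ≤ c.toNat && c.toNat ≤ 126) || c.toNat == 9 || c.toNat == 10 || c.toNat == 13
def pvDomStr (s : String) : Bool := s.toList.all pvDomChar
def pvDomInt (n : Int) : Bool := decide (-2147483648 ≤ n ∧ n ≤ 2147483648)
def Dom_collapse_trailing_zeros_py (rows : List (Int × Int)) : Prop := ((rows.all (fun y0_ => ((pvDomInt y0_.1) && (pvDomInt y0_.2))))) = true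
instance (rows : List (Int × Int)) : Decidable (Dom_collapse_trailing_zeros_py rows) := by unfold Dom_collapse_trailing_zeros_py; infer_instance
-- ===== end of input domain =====

-- B replaces A's two-stage last-nonzero-index scan + indexed rebuild loop by one
-- index-free forward pass that buffers zero runs and collapses the final buffer
-- into the sentinel (objective: alternative decomposition, same cost).

-- ===== PORT A =====
-- the `for i,(_,pts) in enumerate(rows)` scan computing last_nonzero
def pvLN (rows : List (Int × Int)) : Int :=
  (PySem.List.enumerate rows 0).foldl (fun ln p => if p.2.2 > 0 then p.1 else ln) (-1)

-- the `for i,(pos,pts) in enumerate(rows)` build loop with its break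
def pvBuildA (ln : Int) : List (Int × Int × Int) → List (String × Int)
  | [] => []
  | (i, pos, pts) :: rest =>
      if i ≤ ln then (PySem.Int.toStr pos, pts) :: pvBuildA ln rest
      else [(PySem.Int.toStr pos ++ "+", 0)]

def collapse_trailing_zeros_py (rows : List (Int × Int)) : List (String × Int) :=
  if rows = [] then []
  else
    let last_nonzero : Int := pvLN rows
    if last_nonzero = -1 then
      [(PySem.Int.toStr (PySem.List.pyGetD rows 0 (0, 0)).1 ++ "+", 0)]
    else
      pvBuildA last_nonzero (PySem.List.enumerate rows 0)

-- ===== PORT B =====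
-- one step of Source B's loop: state = (result, pending)
def pvStepB (st : List (String × Int) × List (Int × Int)) (x : Int × Int) :
    List (String × Int) × List (Int × Int) :=
  if x.2 > 0 then
    (st.1 ++ st.2.map (fun p => (PySem.Int.toStr p.1, p.2)) ++ [(PySem.Int.toStr x.1, x.2)], [])
  else
    (st.1, st.2 ++ [x])

def collapse_trailing_zeros_py_alt (rows : List (Int × Int)) : List (String × Int) :=
  let st := rows.foldl pvStepB ([], [])
  match st.2 with
  | [] => st.1
  | y :: _ => st.1 ++ [(PySem.Int.toStr y.1 ++ "+", 0)]

-- ===== PRECONDITION & SPEC =====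
def Spec_collapse_trailing_zeros_py (rows : List (Int × Int)) (out : List (String × Int)) : Prop := out = collapse_trailing_zeros_py_alt rows
instance (rows : List (Int × Int)) (out : List (String × Int)) : Decidable (Spec_collapse_trailing_zeros_py rows out) := by unfold Spec_collapse_trailing_zeros_py; infer_instance

-- ===== CLAIM =====
def Claim_equal_collapse_trailing_zeros_py : Prop := ∀ (rows : List (Int × Int)), Dom_collapse_trailing_zeros_py rows → Spec_collapse_trailing_zeros_py rows (collapse_trailing_zeros_py rows)

-- ===== LEMMAS AND PROOFS =====

-- appending one row to the scan: a positive row moves last_nonzero to its index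
theorem pvLN_concat (rows : List (Int × Int)) (x : Int × Int) :
    pvLN (rows ++ [x]) = if x.2 > 0 then (rows.length : Int) else pvLN rows := by
  unfold pvLN
  rw [PySem.List.enumerate_append, List.foldl_append]
  by_cases hp : x.2 > 0 <;>
    simp [PySem.List.enumerate_cons, PySem.List.enumerate_nil, hp]

theorem pvLN_bounds (rows : List (Int × Int)) :
    -1 ≤ pvLN rows ∧ pvLN rows < rows.length := by
  induction rows using List.reverseRecOn with
  | nil => simp [pvLN, PySem.List.enumerate_nil]
  | append_singleton rows x ih =>
      rw [pvLN_concat]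
      by_cases hp : x.2 > 0 <;> simp [hp, List.length_append] <;> omega

-- A's break loop as take-then-sentinel, for any cutoff ln
theorem pvBuildA_take (rows : List (Int × Int)) : ∀ (s ln : Int), 0 ≤ s →
    pvBuildA ln (PySem.List.enumerate rows s)
      = (rows.take (ln + 1 - s).toNat).map (fun p => (PySem.Int.toStr p.1, p.2))
        ++ (if (ln + 1 - s).toNat < rows.length then
              [(PySem.Int.toStr (rows.getD (ln + 1 - s).toNat (0, 0)).1 ++ "+", 0)]
            else []) := by
  induction rows with
  | nil => intro s ln _; simp [PySem.List.enumerate_nil, pvBuildA]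
  | cons x rest ih =>
      intro s ln hs
      obtain ⟨pos, pts⟩ := x
      rw [PySem.List.enumerate_cons]
      by_cases hle : s ≤ ln
      · have ht : (ln + 1 - s).toNat = (ln + 1 - (s + 1)).toNat + 1 := by omega
        simp only [pvBuildA, if_pos hle, ht, List.take_succ_cons, List.map_cons,
          List.length_cons, List.getD_cons_succ, List.cons_append]
        rw [ih (s + 1) ln (by omega)]
        simp
      · have ht : (ln + 1 - s).toNat = 0 := by omega
        simp [pvBuildA, hle, ht]

-- invariant of B's fold: result = stringified prefix up to the last positive row,
-- pending = the trailing non-positive run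
theorem pvFoldB (rows : List (Int × Int)) :
    rows.foldl pvStepB ([], []) =
      ((rows.take (pvLN rows + 1).toNat).map (fun p => (PySem.Int.toStr p.1, p.2)),
       rows.drop (pvLN rows + 1).toNat) := by
  induction rows using List.reverseRecOn with
  | nil => simp [pvLN, PySem.List.enumerate_nil]
  | append_singleton rows x ih =>
      obtain ⟨hge, hlt⟩ := pvLN_bounds rows
      rw [List.foldl_append, List.foldl_cons, List.foldl_nil, ih, pvLN_concat]
      by_cases hp : x.2 > 0
      · have hK : ((rows.length : Int) + 1).toNat = rows.length + 1 := by omega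
        simp only [if_pos hp, pvStepB, hp, if_pos, hK, Prod.mk.injEq]
        refine ⟨?_, ?_⟩
        · rw [← List.map_append, List.take_append_drop]
          simp [List.take_of_length_le, List.length_append]
        · simp [List.drop_eq_nil_of_le, List.length_append]
      · have hK : (pvLN rows + 1).toNat ≤ rows.length := by omega
        simp only [if_neg hp, pvStepB, hp, ite_false, Prod.mk.injEq]
        refine ⟨?_, ?_⟩
        · rw [List.take_append_of_le_length hK]
        · rw [List.drop_append_of_le_length hK]

-- ===== VERDICT =====
theorem collapse_trailing_zeros_py_spec : Claim_equal_collapse_trailing_zeros_py := by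
  intro rows _
  unfold Spec_collapse_trailing_zeros_py collapse_trailing_zeros_py collapse_trailing_zeros_py_alt
  rcases rows with _ | ⟨x, rest⟩
  · simp
  set rows := x :: rest with hrows
  have hne : rows ≠ [] := by simp [hrows]
  obtain ⟨hge, hlt⟩ := pvLN_bounds rows
  simp only [if_neg hne, pvFoldB rows]
  set ln := pvLN rows with hln
  clear_value ln
  by_cases hm1 : ln = -1
  · -- all-zeros branch: buffer holds every row, sentinel is rows[0]
    subst hm1
    norm_num
    have h0 : PySem.List.pyGetD rows 0 (0, 0) = rows.getD 0 (0, 0) := by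
      simpa using PySem.List.pyGetD_natCast rows 0 (0, 0)
    rw [h0]
    simp [hrows]
  · simp only [if_neg hm1]
    rw [pvBuildA_take rows 0 ln (le_refl 0)]
    simp only [sub_zero]
    by_cases hc : (ln + 1).toNat < rows.length
    · rw [if_pos hc, List.drop_eq_getElem_cons hc]
      simp [List.getD_eq_getElem?_getD, List.getElem?_eq_getElem hc]
    · have hd : rows.drop (ln + 1).toNat = [] := List.drop_eq_nil_of_le (by omega)
      rw [if_neg hc, hd, List.append_nil]
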